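-- pv_equiv track=rewrite | github.com/Mariya-Ilieva/MachineLearning | homework-20/task4.py | y_zip
-- ===== SOURCE A (Python) =====
-- def y_zip(seq1, seq2):
--     len1 = len(seq1)
--     len2 = len(seq2)
--     i = 0
--     j = 0
--
--     while True:
--         temp_i = i % len1
--         temp_j = j % len2
--
--         el1 = seq1[temp_i]
--         el2 = seq2[temp_j]
--
--         yield el1, el2
--
--         i += 1
--         j += 1
--
--         if i % len1 == 0 and j % len2 == 0:
--             break
-- ===== SOURCE B (Python) =====
-- def y_zip(seq1, seq2):
--     # Replicate each sequence by whole copies until both replicas reach the same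
--     # length (the lcm of the two lengths), then pair them up positionally.
--     r1 = list(seq1)
--     r2 = list(seq2)
--     while len(r1) != len(r2):
--         if len(r1) < len(r2):
--             r1 += seq1
--         else:
--             r2 += seq2
--     yield from zip(r1, r2)
-- ===== Notes on version B (the rewrite author's own statement) =====
-- stated objective: alternative
-- what changed: B drops A's counters, modular indexing and simultaneous-wrap break entirely: it extends whichever replica list is shorter by one whole copy of its sequence until the two replicas have equal length (the lcm), then zips them positionally.
import Mathlib
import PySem

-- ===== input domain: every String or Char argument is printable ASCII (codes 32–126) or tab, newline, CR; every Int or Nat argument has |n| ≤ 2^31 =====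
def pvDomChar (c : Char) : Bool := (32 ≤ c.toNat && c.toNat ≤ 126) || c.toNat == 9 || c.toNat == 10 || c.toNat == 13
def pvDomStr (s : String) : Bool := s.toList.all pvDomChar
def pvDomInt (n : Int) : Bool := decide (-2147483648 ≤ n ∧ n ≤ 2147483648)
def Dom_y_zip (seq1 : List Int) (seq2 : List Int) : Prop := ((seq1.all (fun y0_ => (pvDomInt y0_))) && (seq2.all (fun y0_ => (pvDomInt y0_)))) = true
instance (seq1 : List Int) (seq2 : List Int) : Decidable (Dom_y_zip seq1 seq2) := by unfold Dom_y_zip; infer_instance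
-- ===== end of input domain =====

-- B replaces A's two counters, modular indexing and simultaneous-wrap break by a
-- replicate-then-zip strategy: extend the shorter replica by a whole copy of its sequence
-- until both replicas have equal length, then zip positionally (objective: alternative).
-- Equivalence is about the list of yielded values; Pre_ excludes empty sequences, where
-- A's generator raises ZeroDivisionError.

-- ===== PORT A =====
-- A's while-True loop. Counters i = j start at 0 and only increment, so Nat arithmetic is
-- exact for Python's % and indexing here; under Pre_ (both lists nonempty) i % len1 < len1,
-- so List.getD is exactly seq1[i % len1]. Fuel len1*len2 ≥ lcm bounds the loop (the break
-- fires at iteration lcm); it is a totality guard only, never reached before the break under Pre_.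
def y_zip_go (seq1 seq2 : List Int) : Nat → Nat → Nat → List (Int × Int)
  | 0, _, _ => []
  | fuel+1, i, j =>
    let temp_i := i % seq1.length
    let temp_j := j % seq2.length
    let el1 := seq1.getD temp_i 0
    let el2 := seq2.getD temp_j 0
    (el1, el2) ::
      (if (i+1) % seq1.length = 0 ∧ (j+1) % seq2.length = 0 then []
       else y_zip_go seq1 seq2 fuel (i+1) (j+1))

def y_zip (seq1 : List Int) (seq2 : List Int) : List (Int × Int) :=
  y_zip_go seq1 seq2 (seq1.length * seq2.length) 0 0

-- ===== PORT B =====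
-- Source B's while-loop: extend the shorter replica by a whole copy of its sequence until the
-- lengths agree. Under Pre_ the lengths meet at lcm after at most len1+len2-2 extensions,
-- so fuel len1+len2 is a totality guard only (outside Pre_ the Python loop may not
-- terminate; nothing is claimed there).
def y_zip_repLoop (seq1 seq2 : List Int) : Nat → List Int → List Int → List Int × List Int
  | 0, r1, r2 => (r1, r2)
  | fuel+1, r1, r2 =>
    if r1.length = r2.length then (r1, r2)
    else if r1.length < r2.length then y_zip_repLoop seq1 seq2 fuel (r1 ++ seq1) r2
    else y_zip_repLoop seq1 seq2 fuel r1 (r2 ++ seq2)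

def y_zip_alt (seq1 : List Int) (seq2 : List Int) : List (Int × Int) :=
  let p := y_zip_repLoop seq1 seq2 (seq1.length + seq2.length) seq1 seq2
  p.1.zip p.2

-- ===== PRECONDITION & SPEC =====
-- Pre_ excludes exactly the inputs on which A raises: with an empty seq1 or seq2 the first
-- next() hits i % 0 / j % 0 and raises ZeroDivisionError, so A returns no value there.
def Pre_y_zip (seq1 : List Int) (seq2 : List Int) : Prop := seq1 ≠ [] ∧ seq2 ≠ []
instance (seq1 : List Int) (seq2 : List Int) : Decidable (Pre_y_zip seq1 seq2) := by unfold Pre_y_zip; infer_instance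
def pvWitness_y_zip : List Int × List Int := ([1, 2], [3, 4, 5])

def Spec_y_zip (seq1 : List Int) (seq2 : List Int) (out : List (Int × Int)) : Prop := out = y_zip_alt seq1 seq2
instance (seq1 : List Int) (seq2 : List Int) (out : List (Int × Int)) : Decidable (Spec_y_zip seq1 seq2 out) := by unfold Spec_y_zip; infer_instance

-- ===== CLAIM (what is proved, stated in full; the proofs are below) =====
def Claim_equal_y_zip : Prop := ∀ (seq1 : List Int) (seq2 : List Int), Dom_y_zip seq1 seq2 → Pre_y_zip seq1 seq2 → Spec_y_zip seq1 seq2 (y_zip seq1 seq2)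

-- ===== LEMMAS AND PROOFS =====

-- Characterisation of A's loop: starting at i = j = k < n (n = lcm), with fuel ≥ n - k,
-- it yields exactly the pairs for indices k, k+1, …, n-1.
theorem y_zip_go_eq (seq1 seq2 : List Int) (h1 : seq1 ≠ []) (h2 : seq2 ≠ [])
    (n : Nat) (hn : n = Nat.lcm seq1.length seq2.length) :
    ∀ (fuel k : Nat), k < n → n - k ≤ fuel →
      y_zip_go seq1 seq2 fuel k k =
        (List.range (n - k)).map
          (fun t => (seq1.getD ((k + t) % seq1.length) 0, seq2.getD ((k + t) % seq2.length) 0)) := by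
  have l1pos : 0 < seq1.length := List.length_pos_iff.mpr h1
  have l2pos : 0 < seq2.length := List.length_pos_iff.mpr h2
  have npos : 0 < n := by
    rw [hn]; exact Nat.pos_of_ne_zero (Nat.lcm_ne_zero (by omega) (by omega))
  intro fuel
  induction fuel with
  | zero => intro k hk hf; omega
  | succ fuel ih =>
    intro k hk hf
    rw [y_zip_go]
    by_cases hstop : (k+1) % seq1.length = 0 ∧ (k+1) % seq2.length = 0
    · have hdvd : n ∣ (k+1) := by
        rw [hn]
        exact Nat.lcm_dvd (Nat.dvd_of_mod_eq_zero hstop.1) (Nat.dvd_of_mod_eq_zero hstop.2)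
      have hkn : k + 1 = n := by
        rcases hdvd with ⟨c, hc⟩
        rcases c with _ | c
        · omega
        · rcases c with _ | c
          · omega
          · nlinarith
      have : n - k = 1 := by omega
      simp [hstop, this]
    · have hkn : k + 1 < n := by
        rcases Nat.lt_or_ge (k+1) n with h | h
        · exact h
        · exfalso
          have heq : n = k + 1 := by omega
          apply hstop
          constructor
          · exact Nat.mod_eq_zero_of_dvd (heq ▸ hn ▸ Nat.dvd_lcm_left seq1.length seq2.length)
          · exact Nat.mod_eq_zero_of_dvd (heq ▸ hn ▸ Nat.dvd_lcm_right seq1.length seq2.length)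
      rw [if_neg hstop, ih (k+1) hkn (by omega)]
      have hm : n - k = (n - (k+1)) + 1 := by omega
      rw [hm, List.range_succ_eq_map, List.map_cons, List.map_map]
      simp only [Nat.add_zero]
      congr 1
      apply List.map_congr_left
      intro t _
      simp only [Function.comp_apply, Nat.succ_eq_add_one]
      have : k + (t + 1) = (k + 1) + t := by omega
      rw [this]

theorem flatten_replicate_length (l : List Int) (a : Nat) :
    ((List.replicate a l).flatten).length = a * l.length := by
  induction a with
  | zero => simp
  | succ a ih => simp [List.replicate_succ, ih]; ring

theorem flatten_replicate_getD (l : List Int) (hl : l ≠ []) :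
    ∀ (a k : Nat), k < a * l.length →
      ((List.replicate a l).flatten).getD k 0 = l.getD (k % l.length) 0 := by
  have lpos : 0 < l.length := List.length_pos_iff.mpr hl
  intro a
  induction a with
  | zero => intro k hk; omega
  | succ a ih =>
    intro k hk
    rw [List.replicate_succ, List.flatten_cons]
    by_cases h : k < l.length
    · rw [List.getD_eq_getElem?_getD, List.getElem?_append_left h,
          Nat.mod_eq_of_lt h, List.getD_eq_getElem?_getD]
    · rw [Nat.not_lt] at h
      rw [List.getD_eq_getElem?_getD, List.getElem?_append_right h,
        ← List.getD_eq_getElem?_getD,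
        ih (k - l.length) (by rw [Nat.add_mul, Nat.one_mul] at hk; omega)]
      congr 1
      conv_rhs => rw [show k = (k - l.length) + l.length by omega]
      rw [Nat.add_mod_right]

theorem zip_eq_map_range (xs ys : List Int) (h : xs.length = ys.length) :
    xs.zip ys = (List.range xs.length).map (fun k => (xs.getD k 0, ys.getD k 0)) := by
  induction xs generalizing ys with
  | nil => simp
  | cons x xs ih =>
    cases ys with
    | nil => simp at h
    | cons y ys =>
      simp only [List.length_cons] at h ⊢
      rw [List.zip_cons_cons, List.range_succ_eq_map, List.map_cons, List.map_map]
      simp only [List.getD_cons_zero]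
      congr 1
      rw [ih ys (by omega)]
      apply List.map_congr_left
      intro t _
      simp

-- Invariant of B's loop: starting from a, b whole copies (lengths ≤ lcm), it ends at
-- exactly lcm/len1 and lcm/len2 copies.
theorem repLoop_eq (seq1 seq2 : List Int) (h1 : seq1 ≠ []) (h2 : seq2 ≠ []) :
    ∀ (fuel a b : Nat), 1 ≤ a → 1 ≤ b →
      a * seq1.length ≤ Nat.lcm seq1.length seq2.length →
      b * seq2.length ≤ Nat.lcm seq1.length seq2.length →
      (Nat.lcm seq1.length seq2.length / seq1.length - a) +
        (Nat.lcm seq1.length seq2.length / seq2.length - b) ≤ fuel →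
      y_zip_repLoop seq1 seq2 fuel ((List.replicate a seq1).flatten) ((List.replicate b seq2).flatten)
        = ((List.replicate (Nat.lcm seq1.length seq2.length / seq1.length) seq1).flatten,
           (List.replicate (Nat.lcm seq1.length seq2.length / seq2.length) seq2).flatten) := by
  have l1pos : 0 < seq1.length := List.length_pos_iff.mpr h1
  have l2pos : 0 < seq2.length := List.length_pos_iff.mpr h2
  set L := Nat.lcm seq1.length seq2.length with hL
  have hd1 : seq1.length ∣ L := Nat.dvd_lcm_left _ _
  have hd2 : seq2.length ∣ L := Nat.dvd_lcm_right _ _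
  have hA : (L / seq1.length) * seq1.length = L := Nat.div_mul_cancel hd1
  have hB : (L / seq2.length) * seq2.length = L := Nat.div_mul_cancel hd2
  intro fuel
  induction fuel with
  | zero =>
    intro a b ha hb hal hbl hf
    have haL : a ≤ L / seq1.length := (Nat.le_div_iff_mul_le l1pos).mpr hal
    have hbL : b ≤ L / seq2.length := (Nat.le_div_iff_mul_le l2pos).mpr hbl
    have ha' : a = L / seq1.length := by omega
    have hb' : b = L / seq2.length := by omega
    rw [ha', hb', y_zip_repLoop]
  | succ fuel ih =>
    intro a b ha hb hal hbl hf
    have haL : a ≤ L / seq1.length := (Nat.le_div_iff_mul_le l1pos).mpr hal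
    have hbL : b ≤ L / seq2.length := (Nat.le_div_iff_mul_le l2pos).mpr hbl
    rw [y_zip_repLoop]
    simp only [flatten_replicate_length]
    by_cases heq : a * seq1.length = b * seq2.length
    · rw [if_pos heq]
      -- equal lengths: L ∣ a*len1 and a*len1 ≤ L, so both replicas are at lcm
      have hdvd : L ∣ a * seq1.length := by
        rw [hL]
        exact Nat.lcm_dvd (Nat.dvd_mul_left _ _) (heq ▸ Nat.dvd_mul_left _ _)
      have hLle : L ≤ a * seq1.length := Nat.le_of_dvd (by positivity) hdvd
      have ha2 : L / seq1.length ≤ a :=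
        Nat.le_of_mul_le_mul_right (by omega) l1pos
      have hb2 : L / seq2.length ≤ b :=
        Nat.le_of_mul_le_mul_right (by omega) l2pos
      have ha' : a = L / seq1.length := by omega
      have hb' : b = L / seq2.length := by omega
      rw [ha', hb']
    · rw [if_neg heq]
      by_cases hlt : a * seq1.length < b * seq2.length
      · rw [if_pos hlt]
        have haL' : a < L / seq1.length := by
          have h' : a * seq1.length < (L / seq1.length) * seq1.length := by omega
          exact Nat.lt_of_mul_lt_mul_right h'
        have hstep : (a+1) * seq1.length ≤ L := by
          calc (a+1) * seq1.length ≤ (L / seq1.length) * seq1.length :=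
                Nat.mul_le_mul_right _ (by omega)
            _ = L := hA
        have hfl : (List.replicate a seq1).flatten ++ seq1 = (List.replicate (a+1) seq1).flatten := by
          rw [List.replicate_succ', List.flatten_append]; simp
        rw [hfl, ih (a+1) b (by omega) hb hstep hbl (by omega)]
      · rw [if_neg hlt]
        have hgt : b * seq2.length < a * seq1.length := by omega
        have hbL' : b < L / seq2.length := by
          have h' : b * seq2.length < (L / seq2.length) * seq2.length := by omega
          exact Nat.lt_of_mul_lt_mul_right h'
        have hstep : (b+1) * seq2.length ≤ L := by
          calc (b+1) * seq2.length ≤ (L / seq2.length) * seq2.length :=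
                Nat.mul_le_mul_right _ (by omega)
            _ = L := hB
        have hfl : (List.replicate b seq2).flatten ++ seq2 = (List.replicate (b+1) seq2).flatten := by
          rw [List.replicate_succ', List.flatten_append]; simp
        rw [hfl, ih a (b+1) ha (by omega) hal hstep (by omega)]

-- ===== VERDICT (by name: the statement is the Claim_ definition above) =====
theorem y_zip_spec : Claim_equal_y_zip := by
  intro seq1 seq2 _ hpre
  unfold Spec_y_zip y_zip
  obtain ⟨h1, h2⟩ := hpre
  have l1pos : 0 < seq1.length := List.length_pos_iff.mpr h1
  have l2pos : 0 < seq2.length := List.length_pos_iff.mpr h2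
  have hd1 : seq1.length ∣ Nat.lcm seq1.length seq2.length := Nat.dvd_lcm_left _ _
  have hd2 : seq2.length ∣ Nat.lcm seq1.length seq2.length := Nat.dvd_lcm_right _ _
  have hA : (Nat.lcm seq1.length seq2.length / seq1.length) * seq1.length
      = Nat.lcm seq1.length seq2.length := Nat.div_mul_cancel hd1
  have hB : (Nat.lcm seq1.length seq2.length / seq2.length) * seq2.length
      = Nat.lcm seq1.length seq2.length := Nat.div_mul_cancel hd2
  have npos : 0 < Nat.lcm seq1.length seq2.length :=
    Nat.pos_of_ne_zero (Nat.lcm_ne_zero (by omega) (by omega))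
  have hLmn : Nat.lcm seq1.length seq2.length ≤ seq1.length * seq2.length := by
    have : Nat.lcm seq1.length seq2.length ∣ seq1.length * seq2.length :=
      Nat.lcm_dvd (Dvd.intro _ rfl) (Dvd.intro_left _ rfl)
    exact Nat.le_of_dvd (by positivity) this
  -- A's side
  rw [y_zip_go_eq seq1 seq2 h1 h2 (Nat.lcm seq1.length seq2.length) rfl
        (seq1.length * seq2.length) 0 npos (by omega)]
  -- B's side: the loop starts from one copy of each sequence
  have hAle : Nat.lcm seq1.length seq2.length / seq1.length ≤ seq2.length := by
    have := Nat.div_le_div_right (c := seq1.length) hLmn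
    rwa [Nat.mul_div_cancel_left _ l1pos] at this
  have hBle : Nat.lcm seq1.length seq2.length / seq2.length ≤ seq1.length := by
    have := Nat.div_le_div_right (c := seq2.length) hLmn
    rwa [Nat.mul_comm, Nat.mul_div_cancel_left _ l2pos] at this
  have hrep0 := repLoop_eq seq1 seq2 h1 h2 (seq1.length + seq2.length) 1 1 le_rfl le_rfl
    (by simpa using Nat.le_of_dvd npos hd1) (by simpa using Nat.le_of_dvd npos hd2) (by omega)
  simp only [List.replicate_one, List.flatten_cons, List.flatten_nil, List.append_nil] at hrep0
  simp only [y_zip_alt, hrep0]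
  rw [zip_eq_map_range _ _ (by rw [flatten_replicate_length, flatten_replicate_length]; omega)]
  rw [flatten_replicate_length, hA]
  simp only [Nat.sub_zero, Nat.zero_add]
  apply List.map_congr_left
  intro t ht
  rw [List.mem_range] at ht
  rw [flatten_replicate_getD seq1 h1 _ t (by omega),
      flatten_replicate_getD seq2 h2 _ t (by omega)]
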